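-- pv_equiv track=rewrite | github.com/danielgyorgy224/waiter_hf | waiter.py | tiznel_tobb
-- ===== SOURCE A (Python) =====
-- def tiznel_tobb(o):
--     van = False
--     sorszam = 0
--     for i in range(1, len(o)):
--         if i<10:
--             van = True
--             if van == True:
--                 for j in range(1, len(o)):
--                     if j<10:
--                         sorszam = j
--     return sorszam+1
-- ===== SOURCE B (Python) =====
-- def tiznel_tobb(o):
--     return min(max(len(o) - 1, 0), 9) + 1
-- ===== Notes on version B (the rewrite author's own statement) =====
-- stated objective: simpler
-- what changed: Replaced the quadratic nested loops (whose inner loop just records the last index j<10 in range(1,len(o))) with the closed form min(max(len(o)-1,0),9)+1.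
import Mathlib
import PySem

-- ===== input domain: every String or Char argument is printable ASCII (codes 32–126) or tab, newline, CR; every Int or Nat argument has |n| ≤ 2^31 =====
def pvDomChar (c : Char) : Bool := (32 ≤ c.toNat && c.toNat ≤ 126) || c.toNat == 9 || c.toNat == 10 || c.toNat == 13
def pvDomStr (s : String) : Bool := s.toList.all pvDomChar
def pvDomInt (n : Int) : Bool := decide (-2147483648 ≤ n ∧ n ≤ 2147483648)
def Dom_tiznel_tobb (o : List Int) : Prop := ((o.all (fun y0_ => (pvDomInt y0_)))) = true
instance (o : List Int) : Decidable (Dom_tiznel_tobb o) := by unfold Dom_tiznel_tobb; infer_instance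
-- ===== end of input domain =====

-- B replaces A's pointless quadratic nested loops by the closed form min(max(len(o)-1,0),9)+1 (simpler and asymptotically faster).


-- ===== PORT A =====
-- literal port: outer loop over range(1,len(o)); the 'van == True' test is always true
-- right after 'van = True', so the i<10 branch runs the inner loop and sets van := true.
def tiznel_tobb (o : List Int) : Int :=
  let st :=
    (PySem.List.pyRange 1 (o.length : Int) 1).foldl
      (fun (p : Bool × Int) i =>
        if i < 10 then
          (true,
            (PySem.List.pyRange 1 (o.length : Int) 1).foldl
              (fun s j => if j < 10 then j else s) p.2)
        else p)
      (false, 0)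
  st.2 + 1

-- ===== PORT B =====
def tiznel_tobb_alt (o : List Int) : Int :=
  min (max ((o.length : Int) - 1) 0) 9 + 1

-- ===== PRECONDITION & SPEC =====
def Spec_tiznel_tobb (o : List Int) (out : Int) : Prop := out = tiznel_tobb_alt o
instance (o : List Int) (out : Int) : Decidable (Spec_tiznel_tobb o out) := by unfold Spec_tiznel_tobb; infer_instance

-- ===== CLAIM (what is proved, stated in full; the proofs are below) =====
def Claim_equal_tiznel_tobb : Prop := ∀ (o : List Int), Dom_tiznel_tobb o → Spec_tiznel_tobb o (tiznel_tobb o)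

-- ===== LEMMAS AND PROOFS =====

-- inner loop over List.range m (elements 1+k, k < m): result is min m 9 once m ≥ 1
theorem pv_inner_nat (m : Nat) (hm : 1 ≤ m) (s : Int) :
    (List.range m).foldl (fun (s : Int) (k : Nat) => if (1 + (k : Int)) < 10 then 1 + (k : Int) else s) s
      = min (m : Int) 9 := by
  induction m with
  | zero => omega
  | succ m ih =>
    rw [List.range_succ, List.foldl_append]
    by_cases h1 : 1 ≤ m
    · rw [ih h1]
      simp only [List.foldl_cons, List.foldl_nil]
      split_ifs with h <;> push_cast <;> omega
    · have : m = 0 := by omega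
      subst this
      norm_num [List.range_one]
theorem pv_inner (n : Int) (hn : 2 ≤ n) (s : Int) :
    (PySem.List.pyRange 1 n 1).foldl (fun s j => if j < 10 then j else s) s = min (n - 1) 9 := by
  rw [PySem.List.pyRange_one, List.foldl_map]
  have h1 : 1 ≤ (n - 1).toNat := by omega
  rw [pv_inner_nat _ h1 s]
  omega

-- once the accumulator's second component is c, the (simplified) outer loop keeps it there
theorem pv_outer_keep (c : Int) (l : List Int) (b : Bool) :
    ((l.foldl (fun (p : Bool × Int) i => if i < 10 then (true, c) else p) (b, c)).2) = c := by
  induction l generalizing b with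
  | nil => rfl
  | cons i l ih =>
    simp only [List.foldl_cons]
    by_cases h : i < 10
    · rw [if_pos h]; exact ih true
    · rw [if_neg h]; exact ih b

-- ===== VERDICT (by name: the statement is the Claim_ definition above) =====
theorem tiznel_tobb_spec : Claim_equal_tiznel_tobb := by
  intro o _
  show tiznel_tobb o = tiznel_tobb_alt o
  unfold tiznel_tobb tiznel_tobb_alt
  by_cases hn : 2 ≤ (o.length : Int)
  · simp only [pv_inner _ hn]
    rw [PySem.List.pyRange_one_cons (by omega : (1:Int) < (o.length : Int))]
    simp only [List.foldl_cons]
    rw [if_pos (by norm_num : (1:Int) < 10), pv_outer_keep]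
    omega
  · rw [PySem.List.pyRange_one_eq_nil (by omega : (o.length : Int) ≤ 1)]
    simp only [List.foldl_nil]
    have : (o.length : Int) = 0 ∨ (o.length : Int) = 1 := by omega
    rcases this with h | h <;> rw [h] <;> decide
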